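-- pv_equiv track=rewrite | github.com/danieltorrey/optimal-supermarket-routing | test.py | create_paths
-- ===== SOURCE A (Python) =====
-- def create_paths(max_length, DC_node, total_nodes):
--
--     # Initialisation of graph dictionary and cycles list
--     graph = {}
--     paths = []
--
--     # Populating dictionary with edges to form a fully connected, undirected graph without self-loops
--     for i in range(1,total_nodes+1):
--         graph[i] = list(range(1,total_nodes+1))
--
--     # Generating all possible paths for the conditions specified
--     for node in graph:
--         if (node == DC_node):
--             for path in find_paths(graph, node, node):
--                 if (len(path) < max_length+2):
--                     paths.append([node]+path)
--
--     return paths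
--
-- def find_paths(graph, start, end):
--
--     # Initialising paths list
--     paths = [(start, [])]
--
--     while paths:
--         # Removing the top-most node from the paths list to initialise the current node being scanned and path being created
--         current_node, path = paths.pop()
--
--         # Checking whether the node has reached the end of the path
--         if path and current_node == end:
--             yield path
--             continue
--
--         # Checking whether the next node is in the path
--         for next_node in graph[current_node]:
--             # If so, repeat function
--             if next_node in path:
--                 continue
--             # If not, append current path to paths list
--             paths.append((next_node, path+[next_node]))
-- ===== SOURCE B (Python) =====
-- def create_paths(max_length, DC_node, total_nodes):
--     # Depth-bounded DFS: extend a path only while it can still close within the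
--     # length cap, instead of enumerating every simple path and filtering after.
--     bound = max_length + 1
--     paths = []
--
--     def dfs(node, path):
--         if path and node == DC_node:
--             paths.append([DC_node] + path)
--         elif len(path) < bound:
--             for nxt in range(total_nodes, 0, -1):
--                 if nxt not in path:
--                     dfs(nxt, path + [nxt])
--
--     if 1 <= DC_node <= total_nodes:
--         dfs(DC_node, [])
--     return paths
-- ===== Notes on version B (the rewrite author's own statement) =====
-- stated objective: alternative
-- what changed: B replaces A's stack-based exhaustive enumeration of ALL simple cycles followed by a post-hoc length filter with a recursive depth-bounded DFS that never extends a path beyond the length cap (visiting neighbours in descending order, which reproduces A's stack output order exactly); the pruning helps for small caps but both searches are exponential, so no speed is claimed.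
import Mathlib
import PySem

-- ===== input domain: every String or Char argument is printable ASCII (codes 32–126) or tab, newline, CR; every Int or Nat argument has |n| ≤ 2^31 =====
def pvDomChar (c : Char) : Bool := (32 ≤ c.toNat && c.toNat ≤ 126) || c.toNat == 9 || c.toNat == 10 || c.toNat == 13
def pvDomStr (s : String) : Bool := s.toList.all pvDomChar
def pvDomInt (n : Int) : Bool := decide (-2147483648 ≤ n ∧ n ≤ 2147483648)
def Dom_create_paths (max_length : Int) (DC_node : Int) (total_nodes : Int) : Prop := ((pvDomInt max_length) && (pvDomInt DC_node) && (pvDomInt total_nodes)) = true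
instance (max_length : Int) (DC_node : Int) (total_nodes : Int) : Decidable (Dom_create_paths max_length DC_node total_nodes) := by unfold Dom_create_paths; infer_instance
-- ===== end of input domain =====

-- B replaces A's exhaustive stack enumeration of all simple cycles + post-filter by a
-- depth-bounded recursive DFS that prunes paths exceeding the length cap (alternative
-- algorithm; both are exponential, no speed claim).

-- ===== PORT A =====
-- Termination bookkeeping for A's while-loop over the explicit stack: each popped
-- state (node, path) either yields or is replaced by states whose remaining
-- neighbour set is strictly smaller; phiA/muA is the standard exponential potential.
def phiA (nbrs : List Int) (p : List Int) : Nat :=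
  (nbrs.length + 1) ^ (nbrs.filter (fun x => decide (x ∉ p))).length

def muA (nbrs : List Int) (s : List (Int × List Int)) : Nat :=
  (s.map (fun e => phiA nbrs e.2)).sum

-- the block of states Python's inner `for next_node … paths.append(…)` pushes
-- (stack top is the list head here, so the pushed block appears reversed)
def pushA (nbrs : List Int) (p : List Int) : List (Int × List Int) :=
  ((nbrs.filter (fun x => decide (x ∉ p))).map (fun x => (x, p ++ [x]))).reverse

lemma phiA_pos (nbrs p : List Int) : 0 < phiA nbrs p := Nat.pow_pos (by omega)

lemma muA_cons (nbrs : List Int) (c : Int) (p : List Int) (rest : List (Int × List Int)) :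
    muA nbrs ((c, p) :: rest) = phiA nbrs p + muA nbrs rest := by
  simp [muA]

lemma muA_dec (nbrs : List Int) (c : Int) (p : List Int) (rest : List (Int × List Int)) :
    muA nbrs (pushA nbrs p ++ rest) < muA nbrs ((c, p) :: rest) := by
  have hflt : ∀ x ∈ nbrs.filter (fun x => decide (x ∉ p)),
      (nbrs.filter (fun y => decide (y ∉ p ++ [x]))).length
        < (nbrs.filter (fun y => decide (y ∉ p))).length := by
    intro x hx
    have h1 : (fun y : Int => decide (y ∉ p ++ [x]))
        = fun y => decide (y ≠ x) && decide (y ∉ p) := by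
      funext y; simp [List.mem_append]; exact Bool.and_comm _ _
    rw [h1, ← List.filter_filter]
    exact List.length_filter_lt_length_iff_exists.mpr ⟨x, hx, by simp⟩
  have hmain : muA nbrs (pushA nbrs p) < phiA nbrs p := by
    unfold muA pushA
    rw [List.map_reverse, List.sum_reverse, List.map_map]
    by_cases hL : nbrs.filter (fun x => decide (x ∉ p)) = []
    · rw [hL]; exact phiA_pos nbrs p
    · set L := nbrs.filter (fun x => decide (x ∉ p)) with hLdef
      set k := L.length with hk
      set K := nbrs.length + 1 with hKdef
      have hk1 : 1 ≤ k := List.length_pos_iff.mpr hL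
      have hbound : ∀ y ∈ L.map ((fun e : Int × List Int => phiA nbrs e.2) ∘ fun x => (x, p ++ [x])),
          y ≤ K ^ (k - 1) := by
        intro y hy
        obtain ⟨x, hxL, rfl⟩ := List.mem_map.mp hy
        have hlt := hflt x hxL
        have hbk : (nbrs.filter (fun y => decide (y ∉ p))).length = k := rfl
        have : (nbrs.filter (fun y => decide (y ∉ p ++ [x]))).length ≤ k - 1 := by omega
        calc phiA nbrs (p ++ [x])
            = K ^ (nbrs.filter (fun y => decide (y ∉ p ++ [x]))).length := rfl
          _ ≤ K ^ (k - 1) := Nat.pow_le_pow_right (by omega) this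
      have hsum := List.sum_le_card_nsmul _ _ hbound
      rw [List.length_map] at hsum
      have hkK : k < K := by
        have h := List.length_filter_le (fun x => decide (x ∉ p)) nbrs
        have hbk : (nbrs.filter (fun x => decide (x ∉ p))).length = k := rfl
        omega
      have hMpos : 0 < K ^ (k - 1) := Nat.pow_pos (by omega)
      have hpow : K ^ k = K ^ (k - 1) * K := by
        rw [← pow_succ]; congr 1; omega
      have hphi : phiA nbrs p = K ^ k := rfl
      rw [hphi, hpow]
      calc (L.map _).sum ≤ k • K ^ (k-1) := hsum
        _ = k * K ^ (k-1) := by rw [smul_eq_mul]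
        _ < K ^ (k-1) * K := by nlinarith [hMpos, hkK]
  have happ : muA nbrs (pushA nbrs p ++ rest)
      = muA nbrs (pushA nbrs p) + muA nbrs rest := by simp [muA]
  rw [happ, muA_cons]
  omega

-- A's find_paths: an explicit stack (list head = Python's list end, whence pop()
-- removes the head and the appended block arrives reversed), yielding `path` when
-- it is non-empty and the current node is `end`.
def loopA (endn : Int) (nbrs : List Int) (s : List (Int × List Int))
    (acc : List (List Int)) : List (List Int) :=
  match s with
  | [] => acc
  | (c, p) :: rest =>
    if p ≠ [] ∧ c = endn then loopA endn nbrs rest (acc ++ [p])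
    else loopA endn nbrs (pushA nbrs p ++ rest) acc
termination_by muA nbrs s
decreasing_by
  · rw [muA_cons]; have := phiA_pos nbrs p; omega
  · exact muA_dec nbrs c p rest

-- A's create_paths.  graph maps EVERY key 1..total_nodes to list(range(1,total_nodes+1)),
-- so `graph[current_node]` is always the constant list `nbrs` and `for node in graph`
-- iterates the keys pyRange 1 (total_nodes+1) 1 in insertion order.
def create_paths (max_length : Int) (DC_node : Int) (total_nodes : Int) : List (List Int) :=
  let nbrs := PySem.List.pyRange 1 (total_nodes + 1) 1
  nbrs.foldl
    (fun acc node =>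
      if node = DC_node then
        (loopA node nbrs [(node, [])] []).foldl
          (fun acc2 path =>
            if (path.length : Int) < max_length + 2 then acc2 ++ [node :: path] else acc2)
          acc
      else acc)
    []

-- ===== PORT B =====
-- Source B's dfs: close the cycle, or extend only while the path is still short enough.
def bdfs (bound : Int) (DC : Int) (nbrs : List Int) (c : Int) (p : List Int) : List (List Int) :=
  if p ≠ [] ∧ c = DC then [DC :: p]
  else if (p.length : Int) < bound then
    (nbrs.filter (fun x => decide (x ∉ p))).flatMap (fun x => bdfs bound DC nbrs x (p ++ [x]))
  else []
termination_by (bound - p.length).toNat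
decreasing_by
  simp only [List.length_append, List.length_cons, List.length_nil]
  omega

def create_paths_alt (max_length : Int) (DC_node : Int) (total_nodes : Int) : List (List Int) :=
  let bound := max_length + 1
  if 1 ≤ DC_node ∧ DC_node ≤ total_nodes then
    bdfs bound DC_node (PySem.List.pyRange total_nodes 0 (-1)) DC_node []
  else []

-- ===== PRECONDITION & SPEC =====
def Spec_create_paths (max_length : Int) (DC_node : Int) (total_nodes : Int) (out : List (List Int)) : Prop := out = create_paths_alt max_length DC_node total_nodes
instance (max_length : Int) (DC_node : Int) (total_nodes : Int) (out : List (List Int)) : Decidable (Spec_create_paths max_length DC_node total_nodes out) := by unfold Spec_create_paths; infer_instance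

-- ===== CLAIM (what is proved, stated in full; the proofs are below) =====
def Claim_equal_create_paths : Prop := ∀ (max_length : Int) (DC_node : Int) (total_nodes : Int), Dom_create_paths max_length DC_node total_nodes → Spec_create_paths max_length DC_node total_nodes (create_paths max_length DC_node total_nodes)

-- ===== LEMMAS AND PROOFS =====

-- non-accumulating form of A's stack loop, for the proofs
def loopN (endn : Int) (nbrs : List Int) (s : List (Int × List Int)) : List (List Int) :=
  match s with
  | [] => []
  | (c, p) :: rest =>
    if p ≠ [] ∧ c = endn then p :: loopN endn nbrs rest
    else loopN endn nbrs (pushA nbrs p ++ rest)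
termination_by muA nbrs s
decreasing_by
  · rw [muA_cons]; have := phiA_pos nbrs p; omega
  · exact muA_dec nbrs c p rest

lemma loopA_eq_loopN (endn : Int) (nbrs : List Int) :
    ∀ (m : Nat) (s : List (Int × List Int)) (acc : List (List Int)), muA nbrs s ≤ m →
      loopA endn nbrs s acc = acc ++ loopN endn nbrs s := by
  intro m
  induction m with
  | zero =>
    intro s acc h
    cases s with
    | nil => simp [loopA, loopN]
    | cons e s' =>
      obtain ⟨c, p⟩ := e
      rw [muA_cons] at h
      have := phiA_pos nbrs p
      omega
  | succ m ih =>
    intro s acc h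
    cases s with
    | nil => simp [loopA, loopN]
    | cons e s' =>
      obtain ⟨c, p⟩ := e
      rw [loopA, loopN]
      by_cases hb : p ≠ [] ∧ c = endn
      · rw [if_pos hb, if_pos hb]
        rw [muA_cons] at h
        have := phiA_pos nbrs p
        rw [ih s' (acc ++ [p]) (by omega)]
        simp
      · rw [if_neg hb, if_neg hb]
        have hlt := muA_dec nbrs c p s'
        rw [ih _ acc (by omega)]

lemma filter_push_len_lt (nbrs p : List Int) (x : Int)
    (hx : x ∈ nbrs.filter (fun x => decide (x ∉ p))) :
    (nbrs.filter (fun y => decide (y ∉ p ++ [x]))).length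
      < (nbrs.filter (fun y => decide (y ∉ p))).length := by
  have h1 : (fun y : Int => decide (y ∉ p ++ [x]))
      = fun y => decide (y ≠ x) && decide (y ∉ p) := by
    funext y; simp [List.mem_append]; exact Bool.and_comm _ _
  rw [h1, ← List.filter_filter]
  exact List.length_filter_lt_length_iff_exists.mpr ⟨x, hx, by simp⟩

lemma phiA_push_lt (nbrs p : List Int) (x : Int)
    (hx : x ∈ nbrs.filter (fun x => decide (x ∉ p))) :
    phiA nbrs (p ++ [x]) < phiA nbrs p := by
  have h2 : 1 ≤ nbrs.length := List.length_pos_iff.mpr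
    (List.ne_nil_of_mem (List.mem_of_mem_filter hx))
  exact Nat.pow_lt_pow_right (by omega) (filter_push_len_lt nbrs p x hx)

-- the stack loop is local: a stack processes as the concatenation of its pieces
lemma loopN_append (endn : Int) (nbrs : List Int) :
    ∀ (m : Nat) (s t : List (Int × List Int)), muA nbrs s ≤ m →
      loopN endn nbrs (s ++ t) = loopN endn nbrs s ++ loopN endn nbrs t := by
  intro m
  induction m with
  | zero =>
    intro s t h
    cases s with
    | nil => simp [loopN]
    | cons e s' =>
      obtain ⟨c, p⟩ := e
      rw [muA_cons] at h
      have := phiA_pos nbrs p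
      omega
  | succ m ih =>
    intro s t h
    cases s with
    | nil => simp [loopN]
    | cons e s' =>
      obtain ⟨c, p⟩ := e
      rw [List.cons_append, loopN, loopN]
      by_cases hb : p ≠ [] ∧ c = endn
      · rw [if_pos hb, if_pos hb]
        rw [muA_cons] at h
        have := phiA_pos nbrs p
        rw [ih s' t (by omega)]
        simp
      · rw [if_neg hb, if_neg hb, ← List.append_assoc]
        have hlt := muA_dec nbrs c p s'
        exact ih _ t (by omega)

lemma loopN_cons (endn : Int) (nbrs : List Int) (e : Int × List Int)
    (s : List (Int × List Int)) :
    loopN endn nbrs (e :: s) = loopN endn nbrs [e] ++ loopN endn nbrs s := by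
  have : e :: s = [e] ++ s := rfl
  rw [this, loopN_append endn nbrs (muA nbrs [e]) [e] s le_rfl]

lemma loopN_flat (endn : Int) (nbrs : List Int) (l : List (Int × List Int)) :
    loopN endn nbrs l = l.flatMap (fun e => loopN endn nbrs [e]) := by
  induction l with
  | nil => simp [loopN]
  | cons e l ih => rw [loopN_cons, ih]; simp

-- every path yielded from state (c, p) extends p, so it is at least as long
lemma loopN_len_ge (endn : Int) (nbrs : List Int) :
    ∀ (m : Nat) (c : Int) (p : List Int), phiA nbrs p ≤ m →
      ∀ q ∈ loopN endn nbrs [(c, p)], p.length ≤ q.length := by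
  intro m
  induction m with
  | zero =>
    intro c p h
    have := phiA_pos nbrs p
    omega
  | succ m ih =>
    intro c p h q hq
    rw [loopN] at hq
    by_cases hb : p ≠ [] ∧ c = endn
    · rw [if_pos hb] at hq
      simp [loopN] at hq
      simp [hq]
    · rw [if_neg hb, List.append_nil, loopN_flat] at hq
      obtain ⟨e, he, hqe⟩ := List.mem_flatMap.mp hq
      rw [pushA, List.mem_reverse, List.mem_map] at he
      obtain ⟨x, hxL, rfl⟩ := he
      have hphi : phiA nbrs (p ++ [x]) ≤ m := by
        have := phiA_push_lt nbrs p x hxL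
        omega
      have := ih x (p ++ [x]) hphi q hqe
      simp [List.length_append] at this
      omega

-- core: A's enumeration from (c,p), filtered by the length cap and prefixed with DC,
-- is exactly B's bounded DFS from (c,p) over the reversed neighbour list
lemma core (DC bound : Int) (nbrs : List Int) :
    ∀ (m : Nat) (c : Int) (p : List Int), phiA nbrs p ≤ m → (p.length : Int) ≤ bound →
      ((loopN DC nbrs [(c, p)]).filter
          (fun q => decide ((q.length : Int) < bound + 1))).map (fun q => DC :: q)
        = bdfs bound DC nbrs.reverse c p := by
  intro m
  induction m with
  | zero =>
    intro c p h
    have := phiA_pos nbrs p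
    omega
  | succ m ih =>
    intro c p h hlen
    rw [loopN, bdfs]
    by_cases hb : p ≠ [] ∧ c = DC
    · rw [if_pos hb, if_pos hb]
      simp [loopN]
      omega
    · rw [if_neg hb, if_neg hb, List.append_nil, loopN_flat]
      unfold pushA
      rw [← List.map_reverse, List.flatMap_map, List.filter_flatMap, List.map_flatMap]
      by_cases hlt : (p.length : Int) < bound
      · rw [if_pos hlt, List.filter_reverse]
        apply List.flatMap_congr
        intro x hx
        rw [List.mem_reverse] at hx
        have hphi : phiA nbrs (p ++ [x]) ≤ m := by
          have := phiA_push_lt nbrs p x hx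
          omega
        have hlen' : ((p ++ [x]).length : Int) ≤ bound := by
          simp [List.length_append]
          omega
        exact ih x (p ++ [x]) hphi hlen'
      · rw [if_neg hlt]
        have hpb : (p.length : Int) = bound := by omega
        apply List.flatMap_eq_nil_iff.mpr
        intro x hx
        rw [List.mem_reverse] at hx
        have hnil : (loopN DC nbrs [(x, p ++ [x])]).filter
            (fun q => decide ((q.length : Int) < bound + 1)) = [] := by
          apply List.filter_eq_nil_iff.mpr
          intro q hq
          have := loopN_len_ge DC nbrs (phiA nbrs (p ++ [x])) x (p ++ [x]) le_rfl q hq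
          simp only [List.length_append, List.length_cons, List.length_nil] at this
          simp only [decide_eq_true_eq, not_lt]
          omega
        rw [hnil, List.map_nil]

-- the outer `for node in graph` fires at most once because the keys are nodup
lemma pv_foldl_once (DC : Int) (F : Int → List (List Int)) :
    ∀ (keys : List Int), keys.Nodup → ∀ (init : List (List Int)),
      keys.foldl (fun acc node => if node = DC then acc ++ F node else acc) init
        = init ++ (if DC ∈ keys then F DC else []) := by
  intro keys
  induction keys with
  | nil => simp
  | cons k ks ih =>
    intro hnd init
    obtain ⟨hk, hks⟩ := List.nodup_cons.mp hnd
    rw [List.foldl_cons]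
    by_cases hkDC : k = DC
    · subst hkDC
      rw [if_pos rfl, ih hks]
      simp [hk]
    · rw [if_neg hkDC, ih hks]
      have : (DC ∈ k :: ks) ↔ (DC ∈ ks) := by
        simp [List.mem_cons]
        intro h; exact absurd h.symm hkDC
      simp [this]

-- ===== VERDICT (by name: the statement is the Claim_ definition above) =====
theorem create_paths_spec : Claim_equal_create_paths := by
  intro ml DC n _
  unfold Spec_create_paths create_paths create_paths_alt
  dsimp only
  set nbrs := PySem.List.pyRange 1 (n + 1) 1 with hnbrs
  have hAN : ∀ (node : Int), loopA node nbrs [(node, [])] [] = loopN node nbrs [(node, [])] := by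
    intro node
    rw [loopA_eq_loopN node nbrs (muA nbrs [(node, [])]) [(node, [])] [] le_rfl]
    simp
  simp only [hAN]
  have hfun : (fun (acc : List (List Int)) (node : Int) =>
        if node = DC then
          (loopN node nbrs [(node, [])]).foldl
            (fun acc2 path =>
              if (path.length : Int) < ml + 2 then acc2 ++ [node :: path] else acc2) acc
        else acc)
      = fun acc node =>
        if node = DC then
          acc ++ ((loopN node nbrs [(node, [])]).filter
              (fun q => decide ((q.length : Int) < ml + 2))).map (fun q => node :: q)
        else acc := by
    funext acc node
    by_cases h : node = DC
    · simp only [if_pos h]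
      rw [show (fun (acc2 : List (List Int)) (path : List Int) =>
            if (path.length : Int) < ml + 2 then acc2 ++ [node :: path] else acc2)
          = (fun acc2 path =>
            if (fun q : List Int => decide ((q.length : Int) < ml + 2)) path = true
            then acc2 ++ [(fun q : List Int => node :: q) path] else acc2) from by
          funext a q; simp only [decide_eq_true_eq]]
      exact PySem.List.foldl_append_if _ _ _ _
    · simp [h]
  rw [hfun, pv_foldl_once DC _ nbrs (PySem.List.nodup_pyRange_one 1 (n + 1)) [], List.nil_append]
  by_cases hDC : 1 ≤ DC ∧ DC ≤ n
  · have hmem : DC ∈ nbrs := PySem.List.mem_pyRange_one.mpr ⟨hDC.1, by omega⟩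
    rw [if_pos hmem, if_pos hDC]
    have hrev : PySem.List.pyRange n 0 (-1) = nbrs.reverse := by
      rw [PySem.List.pyRange_neg_one_eq_reverse]
      norm_num
      exact hnbrs.symm
    rw [hrev]
    by_cases hml : 0 ≤ ml + 1
    · have hc := core DC (ml + 1) nbrs (phiA nbrs []) DC [] le_rfl (by simpa using hml)
      have h2 : ml + 1 + 1 = ml + 2 := by ring
      rw [h2] at hc
      exact hc
    · rw [bdfs]
      have h1 : ¬(([] : List Int) ≠ [] ∧ DC = DC) := by simp
      rw [if_neg h1]
      have h2 : ¬ (((([] : List Int)).length : Int) < ml + 1) := by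
        simp only [List.length_nil, Int.natCast_zero]
        omega
      rw [if_neg h2]
      have hnil : (loopN DC nbrs [(DC, [])]).filter
          (fun q => decide ((q.length : Int) < ml + 2)) = [] := by
        apply List.filter_eq_nil_iff.mpr
        intro q hq
        simp only [decide_eq_true_eq, not_lt]
        have h0 : (0 : Int) ≤ (q.length : Int) := Int.natCast_nonneg _
        omega
      rw [hnil, List.map_nil]
  · rw [if_neg (fun hmem => hDC ⟨(PySem.List.mem_pyRange_one.mp hmem).1, by
        have := (PySem.List.mem_pyRange_one.mp hmem).2; omega⟩), if_neg hDC]
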